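-- pv_equiv track=rewrite | github.com/vroshupkin/my_pet | draft.py | separate_text
-- ===== SOURCE A (Python) =====
-- def separate_text(text, sep='\n'):
--     arr = []
--     ind_1 = 0
--     ind_2 = 0
--     for i in range(len(text)):
--         if text[i] == sep:
--             ind_2 = i
--             arr.append(text[ind_1:ind_2])
--             ind_1 = ind_2 + 1
--     return arr
-- ===== SOURCE B (Python) =====
-- def separate_text(text, sep='\n'):
--     out = []
--     buf = []
--     for c in text:
--         if c == sep:
--             out.append(''.join(buf))
--             buf = []
--         else:
--             buf.append(c)
--     return out
-- ===== Notes on version B (the rewrite author's own statement) =====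
-- stated objective: alternative
-- what changed: A's index-tracking loop that slices text[ind_1:ind_2] at each separator is replaced by a streaming character accumulator: characters are appended to a buffer and the buffer is flushed (joined and emitted) at each separator, never flushing the trailing buffer; no indices or slicing at all.
import Mathlib
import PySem

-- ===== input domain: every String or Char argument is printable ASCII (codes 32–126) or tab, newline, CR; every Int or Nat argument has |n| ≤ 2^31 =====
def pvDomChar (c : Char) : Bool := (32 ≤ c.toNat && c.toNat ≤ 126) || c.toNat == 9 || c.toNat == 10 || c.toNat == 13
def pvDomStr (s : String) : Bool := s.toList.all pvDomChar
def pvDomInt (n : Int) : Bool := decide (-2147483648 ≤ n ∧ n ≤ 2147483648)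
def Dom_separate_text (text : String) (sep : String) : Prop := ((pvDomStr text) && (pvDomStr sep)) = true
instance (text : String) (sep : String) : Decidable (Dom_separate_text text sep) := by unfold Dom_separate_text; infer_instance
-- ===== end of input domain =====

-- B replaces A's index-tracking/slicing loop by a streaming character accumulator
-- (buffer flushed at each separator, trailing buffer dropped); objective: alternative, same cost.


-- ===== PORT A =====
-- literal port of A: one loop over range(len(text)), tracking ind_1/ind_2, appending text[ind_1:ind_2]
-- (text[i] is a one-character string in Python; the comparison text[i] == sep is ported on .toList)
def separate_text (text : String) (sep : String) : List String :=
  let cs := text.toList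
  let r := (PySem.List.pyRange 0 (cs.length : Int) 1).foldl
    (fun (st : List String × Int × Int) i =>
      if (PySem.List.pyGet? cs i).map (fun c => [c]) = some sep.toList then
        let ind2 := i
        (st.1 ++ [String.ofList (PySem.List.slice cs (some st.2.1) (some ind2))], ind2 + 1, ind2)
      else st)
    ([], 0, 0)
  r.1

-- ===== PORT B =====
-- port of B: stream the characters, accumulating a buffer; flush (''.join) at each separator,
-- never emitting the trailing buffer
def separate_text_alt (text : String) (sep : String) : List String :=
  let r := text.toList.foldl
    (fun (st : List String × List Char) c =>
      if [c] = sep.toList then (st.1 ++ [String.ofList st.2], ([] : List Char))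
      else (st.1, st.2 ++ [c]))
    ([], [])
  r.1

-- ===== PRECONDITION & SPEC =====
def Spec_separate_text (text : String) (sep : String) (out : List String) : Prop := out = separate_text_alt text sep
instance (text : String) (sep : String) (out : List String) : Decidable (Spec_separate_text text sep out) := by unfold Spec_separate_text; infer_instance

-- ===== CLAIM (what is proved, stated in full; the proofs are below) =====
def Claim_equal_separate_text : Prop := ∀ (text : String) (sep : String), Dom_separate_text text sep → Spec_separate_text text sep (separate_text text sep)

-- ===== LEMMAS AND PROOFS =====

-- proof-side intermediates: the separator positions, A's fold reshaped over them, and B's fold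
def sepPositions (cs : List Char) (t : List Char) : List Int :=
  (PySem.List.enumerate cs).filterMap
    (fun ic => if [ic.2] = t then some ic.1 else none)

def posFold (cs t : List Char) : List String × Int :=
  (sepPositions cs t).foldl
    (fun (st : List String × Int) p =>
      (st.1 ++ [String.ofList (PySem.List.slice cs (some st.2) (some p))], p + 1))
    ([], 0)

def bufFold (cs t : List Char) : List String × List Char :=
  cs.foldl
    (fun (st : List String × List Char) c =>
      if [c] = t then (st.1 ++ [String.ofList st.2], ([] : List Char))
      else (st.1, st.2 ++ [c]))
    ([], [])

-- a fold whose body is a no-op off a decidable condition is a fold over the filtered list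
theorem foldl_if_eq_foldl_filter {α β : Type} (p : β → Bool) (g : α → β → α)
    (l : List β) (init : α) :
    l.foldl (fun s i => if p i then g s i else s) init
      = (l.filter p).foldl g init := by
  induction l generalizing init with
  | nil => rfl
  | cons x xs ih =>
    by_cases h : p x <;> simp [h, ih]

-- pyGet? into the left part of an append
theorem pyGet?_append_left_of_lt {α : Type} (xs ys : List α) (i : Int)
    (h0 : 0 ≤ i) (h : i < xs.length) :
    PySem.List.pyGet? (xs ++ ys) i = PySem.List.pyGet? xs i := by
  obtain ⟨n, rfl⟩ := Int.eq_ofNat_of_zero_le h0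
  rw [PySem.List.pyGet?_natCast, PySem.List.pyGet?_natCast]
  rw [List.getElem?_append_left (by exact_mod_cast h)]

-- A's matching indices (as a filter of the index range) are the separator positions
theorem filter_range_eq_positions (cs : List Char) (t : List Char) :
    (PySem.List.pyRange 0 (cs.length : Int) 1).filter
        (fun i => decide ((PySem.List.pyGet? cs i).map (fun c => [c]) = some t))
      = sepPositions cs t := by
  induction cs using List.reverseRecOn with
  | nil => rfl
  | append_singleton cs c ih =>
    unfold sepPositions at ih ⊢
    rw [PySem.List.enumerate_append, List.filterMap_append]
    have hlen : ((cs ++ [c]).length : Int) = (cs.length : Int) + 1 := by simp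
    rw [hlen, PySem.List.pyRange_one_succ_right (by positivity), List.filter_append]
    congr 1
    · rw [← ih]
      apply List.filter_congr
      intro i hi
      obtain ⟨h0, h1⟩ := PySem.List.mem_pyRange_one.mp hi
      rw [pyGet?_append_left_of_lt cs [c] i h0 h1]
    · simp only [PySem.List.enumerate, List.filterMap, List.filter]
      have : PySem.List.pyGet? (cs ++ [c]) (cs.length : Int) = some c := by
        rw [PySem.List.pyGet?_natCast]; simp
      rw [this]
      by_cases h : [c] = t <;> simp [h]

theorem mem_sepPositions {cs t : List Char} {p : Int} (h : p ∈ sepPositions cs t) :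
    0 ≤ p ∧ p < cs.length := by
  unfold sepPositions at h
  obtain ⟨ic, hmem, hif⟩ := List.mem_filterMap.mp h
  obtain ⟨k, hk, rfl⟩ := (PySem.List.mem_enumerate_iff cs 0 ic).mp hmem
  by_cases hc : [(cs[k] : Char)] = t
  · simp only [hc, if_pos, Option.some.injEq] at hif
    subst hif
    constructor
    · positivity
    · simpa using hk
  · simp [hc] at hif

theorem sepPositions_append_singleton (cs : List Char) (c : Char) (t : List Char) :
    sepPositions (cs ++ [c]) t
      = sepPositions cs t ++ (if [c] = t then [(cs.length : Int)] else []) := by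
  unfold sepPositions
  rw [PySem.List.enumerate_append, List.filterMap_append]
  congr 1
  simp only [PySem.List.enumerate, List.filterMap]
  by_cases h : [c] = t <;> simp [h]

-- A's third state component is dead: projecting the fold to (arr, ind_1)
theorem foldl_proj (cs : List Char) (l : List Int) :
    ∀ (arr : List String) (i1 i2 : Int),
    (l.foldl (fun (st : List String × Int × Int) i =>
        (st.1 ++ [String.ofList (PySem.List.slice cs (some st.2.1) (some i))], i + 1, i))
      (arr, i1, i2)).1
    = (l.foldl (fun (st : List String × Int) p =>
        (st.1 ++ [String.ofList (PySem.List.slice cs (some st.2) (some p))], p + 1))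
      (arr, i1)).1 := by
  induction l with
  | nil => intro arr i1 i2; rfl
  | cons x xs ih => intro arr i1 i2; simp [List.foldl_cons, ih]

-- slicing a left part: an appended suffix is invisible when the stop bound stays inside
theorem slice_append_left (cs ys : List Char) (a b : Int)
    (h0 : 0 ≤ a) (h1 : 0 ≤ b) (h2 : b ≤ cs.length) :
    PySem.List.slice (cs ++ ys) (some a) (some b) = PySem.List.slice cs (some a) (some b) := by
  rw [PySem.List.slice_toNat _ h0 h1, PySem.List.slice_toNat _ h0 h1]
  by_cases ha : a.toNat ≤ cs.length
  · rw [List.drop_append_of_le_length ha,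
      List.take_append_of_le_length (by rw [List.length_drop]; omega)]
  · have hz : b.toNat - a.toNat = 0 := by omega
    simp [hz]

-- fold congruence carrying a state invariant
theorem foldl_inv_congr {α β : Type} (f g : α → β → α) (P : α → Prop)
    (l : List β) (init : α) (hinit : P init)
    (hstep : ∀ a b, P a → b ∈ l → f a b = g a b ∧ P (g a b)) :
    l.foldl f init = l.foldl g init := by
  induction l generalizing init with
  | nil => rfl
  | cons x xs ih =>
    obtain ⟨heq, hP⟩ := hstep init x hinit (List.mem_cons_self ..)
    rw [List.foldl_cons, List.foldl_cons, heq,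
      ih (g init x) hP (fun a b ha hb => hstep a b ha (List.mem_cons_of_mem _ hb))]

-- the core correspondence: the positions-fold (A's shape after the rewrites above)
-- equals B's buffer fold, with the invariant "buffer = suffix of cs from the running start"
theorem posFold_eq_bufFold (t : List Char) : ∀ (cs : List Char),
    (posFold cs t).1 = (bufFold cs t).1
      ∧ 0 ≤ (posFold cs t).2
      ∧ (posFold cs t).2 ≤ cs.length
      ∧ (bufFold cs t).2 = cs.drop (posFold cs t).2.toNat := by
  intro cs
  induction cs using List.reverseRecOn with
  | nil => exact ⟨rfl, le_refl 0, le_refl 0, rfl⟩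
  | append_singleton cs c ih =>
    obtain ⟨hout, h0, hle, hbuf⟩ := ih
    -- the fold over the common prefix of positions, with bodies over cs ++ [c],
    -- equals posFold cs t (the suffix [c] is invisible to the in-range slices)
    have hpre :
        (sepPositions cs t).foldl
          (fun (st : List String × Int) p =>
            (st.1 ++ [String.ofList (PySem.List.slice (cs ++ [c]) (some st.2) (some p))], p + 1))
          ([], 0) = posFold cs t := by
      unfold posFold
      apply foldl_inv_congr _ _ (fun st => 0 ≤ st.2) _ _ (le_refl 0)
      intro a b ha hb
      obtain ⟨hb0, hblt⟩ := mem_sepPositions hb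
      constructor
      · show (a.1 ++ [String.ofList (PySem.List.slice (cs ++ [c]) (some a.2) (some b))], b + 1)
            = (a.1 ++ [String.ofList (PySem.List.slice cs (some a.2) (some b))], b + 1)
        rw [slice_append_left cs [c] a.2 b ha hb0 (le_of_lt hblt)]
      · show (0 : Int) ≤ b + 1
        omega
    have hposA : posFold (cs ++ [c]) t
        = ((sepPositions cs t) ++ (if [c] = t then [(cs.length : Int)] else [])).foldl
          (fun (st : List String × Int) p =>
            (st.1 ++ [String.ofList (PySem.List.slice (cs ++ [c]) (some st.2) (some p))], p + 1))
          ([], 0) := by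
      unfold posFold
      rw [sepPositions_append_singleton]
    have hbufA : bufFold (cs ++ [c]) t
        = (if [c] = t
            then ((bufFold cs t).1 ++ [String.ofList (bufFold cs t).2], ([] : List Char))
            else ((bufFold cs t).1, (bufFold cs t).2 ++ [c])) := by
      unfold bufFold
      rw [List.foldl_append, List.foldl_cons, List.foldl_nil]
    by_cases hc : [c] = t
    · -- a separator: A slices cs[start : len cs], which is exactly B's buffer; B flushes
      have hsl : PySem.List.slice (cs ++ [c]) (some (posFold cs t).2) (some (cs.length : Int))
          = cs.drop (posFold cs t).2.toNat := by
        rw [slice_append_left cs [c] _ _ h0 (by positivity) (le_refl _),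
          PySem.List.slice_toNat _ h0 (by positivity)]
        have hN : ((cs.length : Int)).toNat = cs.length := by omega
        rw [hN, List.take_of_length_le (by rw [List.length_drop])]
      rw [hposA, List.foldl_append, hpre, if_pos hc, List.foldl_cons, List.foldl_nil]
      rw [hbufA, if_pos hc]
      refine ⟨?_, ?_, ?_, ?_⟩
      · show (posFold cs t).1 ++ [String.ofList (PySem.List.slice (cs ++ [c])
            (some (posFold cs t).2) (some (cs.length : Int)))]
          = (bufFold cs t).1 ++ [String.ofList (bufFold cs t).2]
        rw [hsl, hout, hbuf]
      · show (0 : Int) ≤ (cs.length : Int) + 1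
        positivity
      · show ((cs.length : Int) + 1 : Int) ≤ ((cs ++ [c]).length : Int)
        simp
      · show ([] : List Char) = (cs ++ [c]).drop ((cs.length : Int) + 1).toNat
        rw [List.drop_eq_nil_of_le (by simp)]
    · -- not a separator: A's fold is unchanged; B extends the buffer
      rw [hposA, List.foldl_append, hpre, if_neg hc, List.foldl_nil]
      rw [hbufA, if_neg hc]
      refine ⟨hout, h0, by simp; omega, ?_⟩
      show (bufFold cs t).2 ++ [c] = (cs ++ [c]).drop (posFold cs t).2.toNat
      rw [List.drop_append_of_le_length (by omega), hbuf]

-- ===== VERDICT (by name: the statement is the Claim_ definition above) =====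
theorem separate_text_spec : Claim_equal_separate_text := by
  intro text sep _
  unfold Spec_separate_text separate_text separate_text_alt
  simp only []
  rw [show (fun (st : List String × Int × Int) i =>
      if (PySem.List.pyGet? text.toList i).map (fun c => [c]) = some sep.toList then
        (st.1 ++ [String.ofList (PySem.List.slice text.toList (some st.2.1) (some i))], i + 1, i)
      else st)
    = (fun (st : List String × Int × Int) i =>
      if (decide ((PySem.List.pyGet? text.toList i).map (fun c => [c]) = some sep.toList) : Bool) then
        (st.1 ++ [String.ofList (PySem.List.slice text.toList (some st.2.1) (some i))], i + 1, i)
      else st) from by funext st i; by_cases h : (PySem.List.pyGet? text.toList i).map (fun c => [c]) = some sep.toList <;> simp [h]]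
  rw [foldl_if_eq_foldl_filter]
  rw [filter_range_eq_positions text.toList sep.toList]
  rw [foldl_proj text.toList _ [] 0 0]
  exact (posFold_eq_bufFold sep.toList text.toList).1
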